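-- pv_equiv track=rewrite | github.com/zhenyulin/py-neetcode | src/array/subsequence_search_equal_average.py | subsequenceEqualAverage
-- ===== SOURCE A (Python) =====
-- def subsequenceEqualAverage(arr: list[int]) -> bool:
--     """
--     subsequence search with condition
--
--     1) Dynamic Programming
--
--     we can record all possible sums of subsequence size between (0, N//2)
--     then check if any sum matches 'sum * len(A) == total * size'
--     equivalent to 'sum/size == total/len(A)' but without floating point
--
--     time complexity: O(N^N), space complexity: O(N^N) ~ C(N, N//2) ~ N^(N//2)
--     """
--
--     # arr.sort(reverse=True)
--
--     # TOTAL, N = sum(arr), len(arr)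
--     # HALF = TOTAL / 2
--
--     # # dp[i] denotes possible sum at size N//2-i between (N//2, 0)
--     # dp = [set() for _ in range(N // 2)] + [{0}]
--
--     # for a in arr:
--
--     #     for i in range(len(dp) - 1):
--     #         # from smaller size
--     #         for s in dp[i + 1]:
--     #             if s + a <= HALF:
--     #                 dp[i].add(s + a)
--
--     # for i in range(len(dp) - 1):
--     #     if TOTAL * (N // 2 - i) in [s * N for s in dp[i]]:
--     #         return True
--
--     # return False
--
--     """
--     2) Math
--
--     each 'n' in arr can be updated to its deviation from the average
--     'n - total/len(arr)', which can be reformed to int 'n * len(arr) - total'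
--     then we just need to find the subsequence with a zero sum of deviations
--     """
--
--     total, N = sum(arr), len(arr)
--
--     arr, sums = [a * N - total for a in sorted(arr)], set()
--
--     for a in arr[:-1]:
--         # for sorted arr, a is increasing, therefore only check s + a <= 0
--         sums |= {a} | {a + s for s in sums if s + a <= 0}
--         if 0 in sums:
--             return True
--
--     return False
-- ===== SOURCE B (Python) =====
-- def subsequenceEqualAverage(arr: list[int]) -> bool:
--     """Length-indexed subset-sum DP: dp[k] holds all sums achievable by choosing
--     exactly k elements; by complement symmetry only sizes 1..N//2 need testing."""
--     N = len(arr)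
--     total = sum(arr)
--     half = N // 2
--     dp = [{0}] + [set() for _ in range(half)]
--     for a in arr:
--         dp = dp[:1] + [cur | {s + a for s in prev} for prev, cur in zip(dp, dp[1:])]
--     return any(s * N == total * k for k in range(1, half + 1) for s in dp[k])
-- ===== Notes on version B (the rewrite author's own statement) =====
-- stated objective: alternative
-- what changed: A sorts the array, maps it to deviations a*N-total and grows one pruned set of reachable nonpositive deviation sums over arr[:-1] with an early return; B instead runs a length-indexed subset-sum DP over the unsorted array (dp[k] = sums achievable with exactly k elements, k up to N//2) and checks s*N == total*k, relying on complement symmetry.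
import Mathlib
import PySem

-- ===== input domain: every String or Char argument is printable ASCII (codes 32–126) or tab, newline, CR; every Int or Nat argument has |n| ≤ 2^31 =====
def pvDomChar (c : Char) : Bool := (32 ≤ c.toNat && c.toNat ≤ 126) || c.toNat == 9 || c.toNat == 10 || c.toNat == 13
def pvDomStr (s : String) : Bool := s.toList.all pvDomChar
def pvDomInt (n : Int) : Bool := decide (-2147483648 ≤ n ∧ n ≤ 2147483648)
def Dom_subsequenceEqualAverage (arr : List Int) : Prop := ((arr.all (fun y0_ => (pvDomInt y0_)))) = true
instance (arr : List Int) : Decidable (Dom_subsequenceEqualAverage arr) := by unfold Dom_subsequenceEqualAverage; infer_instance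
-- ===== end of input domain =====

-- B replaces A's sorted-deviation pruned subset-sum search by a length-indexed
-- subset-sum DP checked against s*N == total*k for sizes 1..N//2 (alternative algorithm).


-- ===== PORT A =====
-- sums |= {a} | {a + s for s in sums if s + a <= 0}
def pvStepA (sums : PySem.Set Int) (a : Int) : PySem.Set Int :=
  PySem.Set.union sums
    (PySem.Set.union (PySem.Set.ofList [a])
      (PySem.Set.ofList ((sums.filter (fun s => decide (s + a ≤ 0))).map (fun s => a + s))))

-- for a in arr[:-1]: … ; if 0 in sums: return True   /   return False
def pvLoopA : List Int → PySem.Set Int → Bool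
  | [], _sums => false
  | a :: rest, sums =>
    let sums' := pvStepA sums a
    if (0 : Int) ∈ sums' then true else pvLoopA rest sums'

def subsequenceEqualAverage (arr : List Int) : Bool :=
  let total := arr.sum
  let N : Int := (arr.length : Int)
  let arr2 := (PySem.List.sorted arr (fun a => a) false).map (fun a => a * N - total)
  pvLoopA (PySem.List.slice arr2 none (some (-1))) PySem.Set.empty

-- ===== PORT B =====
-- dp = dp[:1] + [cur | {s + a for s in prev} for prev, cur in zip(dp, dp[1:])]
def pvStepB (dp : List (PySem.Set Int)) (a : Int) : List (PySem.Set Int) :=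
  PySem.List.slice dp none (some 1) ++
    ((dp.zip (PySem.List.slice dp (some 1) none)).map
      (fun pc => PySem.Set.union pc.2 (PySem.Set.ofList (pc.1.map (fun s => s + a)))))

def subsequenceEqualAverage_alt (arr : List Int) : Bool :=
  let N := arr.length
  let total := arr.sum
  let half := N / 2
  let dp0 : List (PySem.Set Int) := [PySem.Set.ofList [0]] ++ (List.range half).map (fun _ => PySem.Set.empty)
  let dp := arr.foldl pvStepB dp0
  (PySem.List.pyRange 1 ((half : Int) + 1) 1).any (fun k =>
    (PySem.List.pyGetD dp k PySem.Set.empty).any (fun s => decide (s * (N : Int) = total * k)))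

-- ===== PRECONDITION & SPEC =====
def Spec_subsequenceEqualAverage (arr : List Int) (out : Bool) : Prop := out = subsequenceEqualAverage_alt arr
instance (arr : List Int) (out : Bool) : Decidable (Spec_subsequenceEqualAverage arr out) := by unfold Spec_subsequenceEqualAverage; infer_instance

-- ===== CLAIM (what is proved, stated in full; the proofs are below) =====
def Claim_equal_subsequenceEqualAverage : Prop := ∀ (arr : List Int), Dom_subsequenceEqualAverage arr → Spec_subsequenceEqualAverage arr (subsequenceEqualAverage arr)

-- ===== LEMMAS AND PROOFS =====

-- the common middle proposition: a nonempty proper sub-multiset with the array's average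
def pvMid (arr : List Int) : Prop :=
  ∃ s u : Multiset Int, s + u = (arr : Multiset Int) ∧ s ≠ 0 ∧ u ≠ 0 ∧
    s.sum * (arr.length : Int) = arr.sum * (s.card : Int)

-- run of A's loop without the early return
def pvFinalA (ds : List Int) (sums : PySem.Set Int) : PySem.Set Int := ds.foldl pvStepA sums

-- a nonempty zero-sum sublist (what A's deviation search looks for)
def pvGood (l : List Int) : Prop := ∃ t, t.Sublist l ∧ t ≠ [] ∧ t.sum = 0

theorem pv_mem_stepA {sums : PySem.Set Int} {a s' : Int} :
    s' ∈ pvStepA sums a ↔ s' ∈ sums ∨ s' = a ∨ ∃ s ∈ sums, s + a ≤ 0 ∧ s' = a + s := by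
  simp only [pvStepA, PySem.Set.mem_union, PySem.Set.mem_ofList, List.mem_map, List.mem_filter,
    List.mem_singleton, decide_eq_true_eq]
  constructor
  · rintro (h | h | ⟨s, ⟨hs, hle⟩, rfl⟩)
    · exact Or.inl h
    · exact Or.inr (Or.inl h)
    · exact Or.inr (Or.inr ⟨s, hs, hle, rfl⟩)
  · rintro (h | h | ⟨s, hs, hle, rfl⟩)
    · exact Or.inl h
    · exact Or.inr (Or.inl h)
    · exact Or.inr (Or.inr ⟨s, ⟨hs, hle⟩, rfl⟩)

theorem pv_mem_finalA_of_mem {ds : List Int} {sums : PySem.Set Int} {s : Int}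
    (h : s ∈ sums) : s ∈ pvFinalA ds sums := by
  induction ds generalizing sums with
  | nil => exact h
  | cons a rest ih => exact ih (pv_mem_stepA.2 (Or.inl h))

theorem pv_loopA_iff {ds : List Int} {sums : PySem.Set Int} (h0 : (0:Int) ∉ sums) :
    pvLoopA ds sums = true ↔ (0:Int) ∈ pvFinalA ds sums := by
  induction ds generalizing sums with
  | nil => simpa [pvLoopA, pvFinalA] using h0
  | cons a rest ih =>
    show (if (0:Int) ∈ pvStepA sums a then true else pvLoopA rest (pvStepA sums a)) = true ↔
      (0:Int) ∈ pvFinalA rest (pvStepA sums a)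
    by_cases h : (0:Int) ∈ pvStepA sums a
    · simp [h, pv_mem_finalA_of_mem h]
    · simp [h, ih h]

theorem pv_finalA_sound {ds : List Int} (P : List Int) {sums : PySem.Set Int}
    (hs : ∀ s ∈ sums, ∃ t, t.Sublist P ∧ t ≠ [] ∧ t.sum = s) :
    ∀ s ∈ pvFinalA ds sums, ∃ t, t.Sublist (P ++ ds) ∧ t ≠ [] ∧ t.sum = s := by
  induction ds generalizing P sums with
  | nil => simpa [pvFinalA] using hs
  | cons a rest ih =>
    have hstep : ∀ s ∈ pvStepA sums a, ∃ t, t.Sublist (P ++ [a]) ∧ t ≠ [] ∧ t.sum = s := by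
      intro s hsm
      rcases pv_mem_stepA.1 hsm with h | rfl | ⟨s0, hs0, _, rfl⟩
      · obtain ⟨t, ht, hne, hsum⟩ := hs s h
        exact ⟨t, ht.trans (List.sublist_append_left P [a]), hne, hsum⟩
      · exact ⟨[s], List.sublist_append_right P [s], by simp, by simp⟩
      · obtain ⟨t, ht, hne, hsum⟩ := hs s0 hs0
        exact ⟨t ++ [a], ht.append (List.Sublist.refl [a]), by simp,
          by simp [hsum, add_comm]⟩
    intro s hmem
    have := ih (P ++ [a]) hstep s hmem
    simpa [List.append_assoc] using this

theorem pv_finalA_ext {ds : List Int} {sums : PySem.Set Int} {s : Int} {t : List Int}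
    (hmem : s ∈ sums) (hsub : t.Sublist ds)
    (hpre : ∀ k, 1 ≤ k → s + (t.take k).sum ≤ 0) :
    s + t.sum ∈ pvFinalA ds sums := by
  induction ds generalizing sums s t with
  | nil =>
    have : t = [] := List.sublist_nil.1 hsub
    subst this
    simpa [pvFinalA] using hmem
  | cons a rest ih =>
    rcases List.sublist_cons_iff.1 hsub with h | ⟨t', rfl, ht'⟩
    · exact ih (pv_mem_stepA.2 (Or.inl hmem)) h hpre
    · have hle : s + a ≤ 0 := by simpa using hpre 1 le_rfl
      have hmem' : s + a ∈ pvStepA sums a :=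
        pv_mem_stepA.2 (Or.inr (Or.inr ⟨s, hmem, hle, add_comm a s ▸ rfl⟩))
      have := ih (t := t') hmem' ht' (fun k hk => by
        have := hpre (k + 1) (by omega)
        simpa [List.take_succ_cons, add_assoc] using this)
      simpa [add_assoc] using this

theorem pv_finalA_complete {ds : List Int} {sums : PySem.Set Int} {t : List Int}
    (hsub : t.Sublist ds) (hne : t ≠ [])
    (hpre : ∀ k, 2 ≤ k → (t.take k).sum ≤ 0) :
    t.sum ∈ pvFinalA ds sums := by
  induction ds generalizing sums t with
  | nil => exact absurd (List.sublist_nil.1 hsub) hne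
  | cons a rest ih =>
    rcases List.sublist_cons_iff.1 hsub with h | ⟨t', rfl, ht'⟩
    · exact ih h hne hpre
    · have hmem : a ∈ pvStepA sums a := pv_mem_stepA.2 (Or.inr (Or.inl rfl))
      have := pv_finalA_ext (ds := rest) hmem ht' (fun k hk => by
        have := hpre (k + 1) (by omega)
        simpa [List.take_succ_cons, add_assoc] using this)
      simpa using this

theorem pv_prefix_nonpos {t : List Int} (hsort : t.Pairwise (· ≤ ·)) (hsum : t.sum = 0) :
    ∀ k, (t.take k).sum ≤ 0 := by
  intro k
  by_contra hpos
  rw [not_le] at hpos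
  have hsplit : (t.take k).sum + (t.drop k).sum = t.sum := by
    rw [← List.sum_append, List.take_append_drop]
  obtain ⟨x, hxmem, hxpos⟩ : ∃ x ∈ t.take k, (0:Int) < x :=
    List.exists_lt_of_sum_lt (fun _ => (0:Int)) id (by simpa using hpos)
  have hpair : ∀ y ∈ t.drop k, x ≤ y := by
    have hp : (t.take k ++ t.drop k).Pairwise (· ≤ ·) := by
      simpa [List.take_append_drop] using hsort
    intro y hy
    exact ((List.pairwise_append.1 hp).2.2) x hxmem y hy
  have hdrop : 0 ≤ (t.drop k).sum :=
    List.sum_nonneg (fun y hy => le_of_lt (lt_of_lt_of_le hxpos (hpair y hy)))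
  omega
theorem pv_sum_map_dev (N total : Int) (t : List Int) :
    (t.map (fun a => a * N - total)).sum = t.sum * N - total * (t.length : Int) := by
  induction t with
  | nil => simp
  | cons a t ih =>
    simp only [List.map_cons, List.sum_cons, List.length_cons, ih]
    push_cast
    ring
theorem pv_A_iff (arr : List Int) :
    subsequenceEqualAverage arr = true ↔
      pvGood (((PySem.List.sorted arr (fun a => a) false).map
        (fun a => a * (arr.length : Int) - arr.sum)).dropLast) := by
  have h0 : (0:Int) ∉ PySem.Set.empty := by simp [PySem.Set.empty]
  show pvLoopA _ _ = true ↔ _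
  rw [PySem.List.slice_to_neg_one, pv_loopA_iff h0]
  constructor
  · intro h
    obtain ⟨t, ht, hne, hsum⟩ := pv_finalA_sound [] (by simp [PySem.Set.empty]) 0 h
    exact ⟨t, by simpa using ht, hne, hsum⟩
  · rintro ⟨t, ht, hne, hsum⟩
    have hpair : (((PySem.List.sorted arr (fun a => a) false).map
        (fun a => a * (arr.length : Int) - arr.sum))).Pairwise (· ≤ ·) := by
      refine List.Pairwise.map _ ?_ (PySem.List.sorted_pairwise arr (fun a => a) ..)
      intro a b hab
      have hN : (0:Int) ≤ (arr.length : Int) := Int.natCast_nonneg _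
      have := mul_le_mul_of_nonneg_right hab hN
      omega
    have htp : t.Pairwise (· ≤ ·) :=
      List.Pairwise.sublist (ht.trans (List.dropLast_sublist _)) hpair
    rw [← hsum]
    exact pv_finalA_complete ht hne (fun k _ => pv_prefix_nonpos htp hsum k)
theorem pv_mid_sym {arr : List Int} {s u : Multiset Int}
    (heq : s + u = (arr : Multiset Int))
    (h : s.sum * (arr.length : Int) = arr.sum * (s.card : Int)) :
    u.sum * (arr.length : Int) = arr.sum * (u.card : Int) := by
  have hsum : s.sum + u.sum = arr.sum := by
    rw [← Multiset.sum_coe, ← heq, Multiset.sum_add]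
  have hcard : (s.card : Int) + (u.card : Int) = (arr.length : Int) := by
    have h2 : s.card + u.card = arr.length := by
      rw [← Multiset.coe_card (l := arr), ← heq, Multiset.card_add]
    exact_mod_cast congrArg (Nat.cast : Nat → Int) h2
  linear_combination (arr.length : Int) * hsum - arr.sum * hcard - h
theorem pv_sub_of_le {l : List Int} {s : Multiset Int} (h : s ≤ (l : Multiset Int)) :
    ∃ t : List Int, t.Sublist l ∧ (t : Multiset Int) = s := by
  have h2 : List.Subperm s.toList l := by
    rw [← Multiset.coe_le, Multiset.coe_toList]
    exact h
  obtain ⟨t, hperm, hsub⟩ := h2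
  exact ⟨t, hsub, by rw [Multiset.coe_eq_coe.2 hperm, Multiset.coe_toList]⟩
theorem pv_good_map_of_le {arr dl : List Int} {w : Multiset Int}
    (hle : w ≤ (dl : Multiset Int)) (hne : w ≠ 0)
    (hcond : w.sum * (arr.length : Int) = arr.sum * (w.card : Int)) :
    pvGood (dl.map (fun a => a * (arr.length : Int) - arr.sum)) := by
  obtain ⟨t, hsub, hcoe⟩ := pv_sub_of_le hle
  refine ⟨t.map (fun a => a * (arr.length : Int) - arr.sum), hsub.map _, ?_, ?_⟩
  · simp only [ne_eq, List.map_eq_nil_iff]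
    rintro rfl
    exact hne (by simp [← hcoe])
  · rw [pv_sum_map_dev]
    have h1 : t.sum = w.sum := by rw [← Multiset.sum_coe, hcoe]
    have h2 : (t.length : Int) = (w.card : Int) := by
      rw [← Multiset.coe_card, hcoe]
    rw [h1, h2, hcond]
    ring
theorem pv_A_iff_mid (arr : List Int) : subsequenceEqualAverage arr = true ↔ pvMid arr := by
  rw [pv_A_iff]
  set l := PySem.List.sorted arr (fun a => a) false with hl
  have hperm : l.Perm arr := PySem.List.sorted_perm ..
  have hcoel : (l : Multiset Int) = (arr : Multiset Int) := Multiset.coe_eq_coe.2 hperm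
  have hlen : l.length = arr.length := hperm.length_eq
  have hmapdrop : ((l.map (fun a => a * (arr.length : Int) - arr.sum))).dropLast
      = l.dropLast.map (fun a => a * (arr.length : Int) - arr.sum) := by
    rw [List.map_dropLast]
  rw [pvGood, hmapdrop]
  constructor
  · rintro ⟨t, ht, hne, hsum⟩
    obtain ⟨t0, ht0, rfl⟩ := List.sublist_map_iff.1 ht
    have hne0 : t0 ≠ [] := by rintro rfl; exact hne rfl
    have hle : (t0 : Multiset Int) ≤ (arr : Multiset Int) := by
      rw [← hcoel, Multiset.coe_le]
      exact (ht0.trans (List.dropLast_sublist _)).subperm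
    obtain ⟨u, hu⟩ := Multiset.le_iff_exists_add.1 hle
    refine ⟨(t0 : Multiset Int), u, hu.symm, by simpa [Multiset.coe_eq_zero] using hne0, ?_, ?_⟩
    · intro hu0
      have hcard : arr.length = t0.length := by
        have h3 := congrArg Multiset.card hu
        simpa [hu0, Multiset.coe_card] using h3
      have h4 : t0.length ≤ l.dropLast.length := ht0.length_le
      have h5 : l.dropLast.length = l.length - 1 := List.length_dropLast
      have hpos : l.length ≠ 0 := by
        rintro h6
        rw [List.length_eq_zero_iff.1 h6] at ht0
        exact hne0 (List.sublist_nil.1 ht0)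
      omega
    · have h7 := pv_sum_map_dev (arr.length : Int) arr.sum t0
      rw [hsum] at h7
      have hs : (t0 : Multiset Int).sum = t0.sum := Multiset.sum_coe t0
      have hc : ((t0 : Multiset Int).card : Int) = (t0.length : Int) := by
        rw [Multiset.coe_card]
      rw [hs, hc]
      omega
  · rintro ⟨s, u, heq, hs, hu, hcond⟩
    have hucond := pv_mid_sym heq hcond
    have harrne : arr ≠ [] := by
      rintro rfl
      have hc0 : s.card + u.card = 0 := by
        simpa [Multiset.coe_card] using congrArg Multiset.card heq
      exact hs (Multiset.card_eq_zero.1 (by omega))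
    have hlne : l ≠ [] := by
      intro h0
      have h1 := hperm.length_eq
      rw [h0] at h1
      exact harrne (List.length_eq_zero_iff.1 h1.symm)
    obtain ⟨dl, x, hdx⟩ : ∃ dl x, l = dl ++ [x] :=
      ⟨l.dropLast, l.getLast hlne, (List.dropLast_append_getLast hlne).symm⟩
    have hdl : l.dropLast = dl := by simp [hdx]
    rw [hdl]
    have hcoe2 : (dl : Multiset Int) + {x} = (arr : Multiset Int) := by
      rw [← hcoel, hdx, ← Multiset.coe_singleton, ← Multiset.coe_add]
    have hx : x ∈ s + u := by
      rw [heq, ← hcoe2]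
      simp
    rcases Multiset.mem_add.1 hx with hxs | hxu
    · -- the last element sits in s; the complement u avoids it
      obtain ⟨s', rfl⟩ := Multiset.exists_cons_of_mem hxs
      have h1 : (x ::ₘ s') + u = (dl : Multiset Int) + {x} := by
        rw [heq]; exact hcoe2.symm
      have h2 : (x ::ₘ s') + u = {x} + (u + s') := by
        rw [← Multiset.singleton_add, add_assoc, add_comm s' u]
      rw [h2, add_comm (dl : Multiset Int) {x}] at h1
      have h3 : u + s' = (dl : Multiset Int) := add_left_cancel h1
      exact pv_good_map_of_le (Multiset.le_iff_exists_add.2 ⟨s', h3.symm⟩) hu hucond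
    · obtain ⟨u', rfl⟩ := Multiset.exists_cons_of_mem hxu
      have h1 : s + (x ::ₘ u') = (dl : Multiset Int) + {x} := by
        rw [heq]; exact hcoe2.symm
      have h2 : s + (x ::ₘ u') = {x} + (s + u') := by
        rw [← Multiset.singleton_add, add_comm s ({x} + u'), add_assoc, add_comm u' s]
      rw [h2, add_comm (dl : Multiset Int) {x}] at h1
      have h3 : s + u' = (dl : Multiset Int) := add_left_cancel h1
      exact pv_good_map_of_le (Multiset.le_iff_exists_add.2 ⟨u', h3.symm⟩) hs hcond
theorem pv_sublist_concat {t p : List Int} {a : Int} :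
    t.Sublist (p ++ [a]) ↔ t.Sublist p ∨ ∃ t', t = t' ++ [a] ∧ t'.Sublist p := by
  constructor
  · intro h
    rcases List.sublist_append_iff.1 h with ⟨t1, t2, rfl, h1, h2⟩
    rcases List.sublist_singleton.1 h2 with rfl | rfl
    · exact Or.inl (by simpa using h1)
    · exact Or.inr ⟨t1, rfl, h1⟩
  · rintro (h | ⟨t', rfl, h⟩)
    · exact h.trans (List.sublist_append_left p [a])
    · exact h.append (List.Sublist.refl [a])

theorem pv_len0_iff {p : List Int} {s : Int} :
    (∃ t : List Int, t.Sublist p ∧ t.length = 0 ∧ t.sum = s) ↔ s = 0 := by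
  constructor
  · rintro ⟨t, _, hlen, rfl⟩
    rw [List.length_eq_zero_iff.1 hlen]
    rfl
  · rintro rfl
    exact ⟨[], List.nil_sublist p, rfl, rfl⟩

def pvDP0 (half : Nat) : List (PySem.Set Int) :=
  [PySem.Set.ofList [0]] ++ (List.range half).map (fun _ => PySem.Set.empty)

def pvInv (p : List Int) (half : Nat) (dp : List (PySem.Set Int)) : Prop :=
  dp.length = half + 1 ∧ ∀ k, k ≤ half → ∀ s : Int,
    (s ∈ dp.getD k PySem.Set.empty ↔ ∃ t : List Int, t.Sublist p ∧ t.length = k ∧ t.sum = s)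

theorem pv_stepB_cons (d : PySem.Set Int) (ds : List (PySem.Set Int)) (a : Int) :
    pvStepB (d :: ds) a = d :: ((d :: ds).zip ds).map
      (fun pc => PySem.Set.union pc.2 (PySem.Set.ofList (pc.1.map (fun s => s + a)))) := by
  rw [pvStepB, PySem.List.slice_from_one,
    PySem.List.slice_to (d :: ds) (by norm_num : (0:Int) ≤ 1)]
  rfl
theorem pv_mem_unionmap {C P : PySem.Set Int} {a s : Int} :
    s ∈ PySem.Set.union C (PySem.Set.ofList (P.map (fun x => x + a))) ↔
      s ∈ C ∨ ∃ x ∈ P, s = x + a := by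
  simp only [PySem.Set.mem_union, PySem.Set.mem_ofList, List.mem_map]
  constructor
  · rintro (h | ⟨x, hx, rfl⟩)
    · exact Or.inl h
    · exact Or.inr ⟨x, hx, rfl⟩
  · rintro (h | ⟨x, hx, rfl⟩)
    · exact Or.inl h
    · exact Or.inr ⟨x, hx, rfl⟩

theorem pv_inv_init (half : Nat) : pvInv [] half (pvDP0 half) := by
  unfold pvInv
  constructor
  · simp [pvDP0]
  · intro k hk s
    match k with
    | 0 =>
      show s ∈ PySem.Set.ofList [0] ↔ _
      rw [pv_len0_iff]
      constructor
      · intro h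
        simpa using (PySem.Set.mem_ofList [0] s).1 h
      · rintro rfl
        exact (PySem.Set.mem_ofList [0] 0).2 (by simp)
    | k + 1 =>
      have hgd : (pvDP0 half).getD (k + 1) PySem.Set.empty = PySem.Set.empty := by
        rcases Nat.lt_or_ge (k + 1) (half + 1) with h | h
        · have hk' : k < half := by omega
          unfold pvDP0
          rw [List.getD_eq_getElem _ _ (by simp; omega)]
          simp
        · exact List.getD_eq_default _ _ (by simp [pvDP0]; omega)
      rw [hgd]
      constructor
      · intro h
        exact absurd h (by simp [PySem.Set.empty])
      · rintro ⟨t, hsub, hlen, _⟩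
        rw [List.sublist_nil.1 hsub] at hlen
        simp at hlen
theorem pv_inv_step {p : List Int} {half : Nat} {dp : List (PySem.Set Int)} {a : Int}
    (h : pvInv p half dp) : pvInv (p ++ [a]) half (pvStepB dp a) := by
  unfold pvInv at h ⊢
  obtain ⟨hlen, hmem⟩ := h
  obtain ⟨d, ds, rfl⟩ : ∃ d ds, dp = d :: ds := by
    cases dp with
    | nil => simp at hlen
    | cons d ds => exact ⟨d, ds, rfl⟩
  have hds : ds.length = half := by simpa using hlen
  rw [pv_stepB_cons]
  have hziplen : (((d :: ds).zip ds).map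
      (fun pc => PySem.Set.union pc.2 (PySem.Set.ofList (pc.1.map (fun s => s + a))))).length
      = half := by
    simp [List.length_zip, hds]
  constructor
  · simp [hziplen]
  · intro k hk s
    match k with
    | 0 =>
      show s ∈ d ↔ _
      rw [pv_len0_iff]
      have := hmem 0 (by omega) s
      rw [pv_len0_iff] at this
      exact this
    | k + 1 =>
      have hk' : k < half := by omega
      have hkz : k < ((d :: ds).zip ds).length := by
        simp [List.length_zip, hds]; omega
      have hgd : (d :: (((d :: ds).zip ds).map
          (fun pc => PySem.Set.union pc.2 (PySem.Set.ofList (pc.1.map (fun s => s + a)))))).getD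
          (k + 1) PySem.Set.empty
          = PySem.Set.union ds[k] (PySem.Set.ofList ((d :: ds)[k].map (fun s => s + a))) := by
        show (((d :: ds).zip ds).map _).getD k PySem.Set.empty = _
        rw [List.getD_eq_getElem _ _ (by simpa using hkz)]
        simp [List.getElem_zip]
      rw [hgd, pv_mem_unionmap]
      have hc : (d :: ds).getD (k + 1) PySem.Set.empty = ds[k] := by
        rw [List.getD_eq_getElem _ _ (by simp; omega)]
        simp
      have hp : (d :: ds).getD k PySem.Set.empty = (d :: ds)[k] := by
        rw [List.getD_eq_getElem _ _ (by simp; omega)]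
      have ih1 := hmem (k + 1) (by omega) s
      rw [hc] at ih1
      constructor
      · rintro (hC | ⟨x, hx, rfl⟩)
        · obtain ⟨t, hsub, hlt, hsm⟩ := ih1.1 hC
          exact ⟨t, pv_sublist_concat.2 (Or.inl hsub), hlt, hsm⟩
        · have ih0 := hmem k (by omega) x
          rw [hp] at ih0
          obtain ⟨t, hsub, hlt, hsm⟩ := ih0.1 hx
          exact ⟨t ++ [a], pv_sublist_concat.2 (Or.inr ⟨t, rfl, hsub⟩),
            by simp [hlt], by simp [hsm]⟩
      · rintro ⟨t, hsub, hlt, hsm⟩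
        rcases pv_sublist_concat.1 hsub with hsub' | ⟨t', rfl, hsub'⟩
        · exact Or.inl (ih1.2 ⟨t, hsub', hlt, hsm⟩)
        · refine Or.inr ⟨t'.sum, ?_, by simp [← hsm]⟩
          have ih0 := hmem k (by omega) t'.sum
          rw [hp] at ih0
          exact ih0.2 ⟨t', hsub', by simpa using hlt, rfl⟩

theorem pv_inv_foldl (arr : List Int) (half : Nat) :
    pvInv arr half (arr.foldl pvStepB (pvDP0 half)) := by
  induction arr using List.reverseRecOn with
  | nil => exact pv_inv_init half
  | append_singleton p a ih =>
    rw [List.foldl_append]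
    exact pv_inv_step ih

theorem pv_B_iff (arr : List Int) :
    subsequenceEqualAverage_alt arr = true ↔
      ∃ k : Nat, 1 ≤ k ∧ k ≤ arr.length / 2 ∧ ∃ t : List Int,
        t.Sublist arr ∧ t.length = k ∧ t.sum * (arr.length : Int) = arr.sum * (k : Int) := by
  have hinv := pv_inv_foldl arr (arr.length / 2)
  unfold pvInv at hinv
  obtain ⟨hlen, hmem⟩ := hinv
  show (PySem.List.pyRange 1 ((((arr.length / 2 : Nat)) : Int) + 1) 1).any _ = true ↔ _
  rw [List.any_eq_true]
  constructor
  · rintro ⟨k, hkmem, hk⟩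
    have hrange := (PySem.List.mem_pyRange_one).1 hkmem
    obtain ⟨n, rfl⟩ : ∃ n : Nat, k = (n : Int) := ⟨k.toNat, (Int.toNat_of_nonneg (by omega)).symm⟩
    have hn1 : 1 ≤ n := by omega
    have hn2 : n ≤ arr.length / 2 := by omega
    rw [PySem.List.pyGetD_natCast, List.any_eq_true] at hk
    obtain ⟨s, hsmem, hs⟩ := hk
    rw [decide_eq_true_eq] at hs
    obtain ⟨t, hsub, hlt, hsm⟩ := (hmem n hn2 s).1 hsmem
    exact ⟨n, hn1, hn2, t, hsub, hlt, by rw [hsm, hs]⟩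
  · rintro ⟨n, hn1, hn2, t, hsub, hlt, hcond⟩
    refine ⟨(n : Int), PySem.List.mem_pyRange_one.2 ⟨by omega, by omega⟩, ?_⟩
    rw [PySem.List.pyGetD_natCast, List.any_eq_true]
    refine ⟨t.sum, (hmem n hn2 t.sum).2 ⟨t, hsub, hlt, rfl⟩, ?_⟩
    rw [decide_eq_true_eq, hcond]

theorem pv_B_iff_mid (arr : List Int) : subsequenceEqualAverage_alt arr = true ↔ pvMid arr := by
  rw [pv_B_iff]
  constructor
  · rintro ⟨n, hn1, hn2, t, hsub, hlt, hcond⟩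
    have hle : (t : Multiset Int) ≤ (arr : Multiset Int) := Multiset.coe_le.2 hsub.subperm
    obtain ⟨u, hu⟩ := Multiset.le_iff_exists_add.1 hle
    refine ⟨(t : Multiset Int), u, hu.symm, ?_, ?_, ?_⟩
    · rw [Ne, Multiset.coe_eq_zero]
      rintro rfl
      simp at hlt
      omega
    · intro hu0
      have := congrArg Multiset.card hu
      rw [hu0] at this
      simp only [Multiset.coe_card, add_zero] at this
      omega
    · rw [Multiset.sum_coe, Multiset.coe_card, hlt]
      exact hcond
  · rintro ⟨s, u, heq, hs, hu, hcond⟩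
    have hcards : s.card + u.card = arr.length := by
      have := congrArg Multiset.card heq
      simpa [Multiset.card_add, Multiset.coe_card] using this
    have hsp : 0 < s.card := Multiset.card_pos.2 hs
    have hup : 0 < u.card := Multiset.card_pos.2 hu
    by_cases hhalf : s.card ≤ arr.length / 2
    · obtain ⟨t, hsub, hcoe⟩ := pv_sub_of_le (Multiset.le_iff_exists_add.2 ⟨u, heq.symm⟩)
      refine ⟨s.card, by omega, hhalf, t, hsub, ?_, ?_⟩
      · rw [← Multiset.coe_card, hcoe]
      · rw [← Multiset.sum_coe, hcoe]
        exact hcond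
    · have hule : u ≤ (arr : Multiset Int) :=
        Multiset.le_iff_exists_add.2 ⟨s, by rw [add_comm]; exact heq.symm⟩
      obtain ⟨t, hsub, hcoe⟩ := pv_sub_of_le hule
      refine ⟨u.card, by omega, by omega, t, hsub, ?_, ?_⟩
      · rw [← Multiset.coe_card, hcoe]
      · rw [← Multiset.sum_coe, hcoe]
        exact pv_mid_sym heq hcond

-- ===== VERDICT (by name: the statement is the Claim_ definition above) =====
theorem subsequenceEqualAverage_spec : Claim_equal_subsequenceEqualAverage := by
  intro arr _
  show subsequenceEqualAverage arr = subsequenceEqualAverage_alt arr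
  rw [Bool.eq_iff_iff, pv_A_iff_mid, pv_B_iff_mid]
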